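-- pv_equiv track=rewrite | github.com/theodoradragan/FASO | sendAdvice.py | getAdvice
-- ===== SOURCE A (Python) =====
-- humidexToAdvice = [
-- 	# (limite superieur pour cet avis, avis)
-- 	(29, "Peu de gens sont incommodés."),
-- 	(34, "Une Sensation de malaise plus ou moins grande."),
-- 	(39, "Une Sensation de malaise assez grande. Prudence. Ralentir certaines activités en plein air."),
-- 	(45, "Une Sensation de malaise généralisée.  Danger. Eviter les efforts."),
-- 	(53, "Il y a un danger extrême.  Il faut arrêter toutes les activités"),
-- 	(100, "Vous risquez un coup de chaleur imminent (danger de mort)."),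
-- ]
--
-- humidex = {
-- 	# temperature : [(humidity, humidex)]
-- 	# on a mis humidex 20 pour les valeurs non trouvees dans la recherche, seulement pour avoir tous les cas possibles
-- 	16 : [(20, 20), (25, 21), (30, 21), (35, 20), (40, 20), (45, 21), (50, 22), (55, 23), (60, 24), (65, 24), (70, 25), (75, 26), (80, 26), (85, 27), (90, 28), (95, 28), (100, 29)],
-- 	17 : [(20, 20), (25, 21), (30, 21), (35, 20), (40, 20), (45, 21), (50, 22), (55, 23), (60, 24), (65, 25), (70, 26), (75, 27), (80, 28), (85, 29), (90, 30), (95, 31), (100, 31)],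
-- 	18 : [(20, 20), (25, 22), (30, 21), (35, 20), (40, 20), (45, 21), (50, 22), (55, 24), (60, 25), (65, 26), (70, 27), (75, 28), (80, 29), (85, 30), (90, 31), (95, 32), (100, 32)],
-- 	19 : [(20, 20), (25, 22), (30, 22), (35, 21), (40, 21), (45, 22), (50, 23), (55, 25), (60, 26), (65, 27), (70, 28), (75, 29), (80, 30), (85, 31), (90, 32), (95, 33), (100, 34)],
-- 	20 : [(20, 20), (25, 23), (30, 22), (35, 21), (40, 21), (45, 22), (50, 24), (55, 26), (60, 27), (65, 28), (70, 29), (75, 30), (80, 31), (85, 32), (90, 33), (95, 34), (100, 35)],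
-- 	21 : [(20, 21), (25, 24), (30, 22), (35, 21), (40, 21), (45, 22), (50, 25), (55, 27), (60, 28), (65, 29), (70, 30), (75, 31), (80, 32), (85, 33), (90, 34), (95, 35), (100, 36)],
-- 	22 : [(20, 22), (25, 25), (30, 23), (35, 22), (40, 22), (45, 23), (50, 25), (55, 28), (60, 29), (65, 30), (70, 31), (75, 32), (80, 33), (85, 34), (90, 35), (95, 36), (100, 37)],
-- 	23 : [(20, 23), (25, 25), (30, 24), (35, 23), (40, 24), (45, 25), (50, 26), (55, 29), (60, 30), (65, 31), (70, 32), (75, 33), (80, 34), (85, 35), (90, 36), (95, 37), (100, 38)],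
-- 	24 : [(20, 24), (25, 26), (30, 25), (35, 24), (40, 25), (45, 26), (50, 27), (55, 30), (60, 31), (65, 32), (70, 33), (75, 34), (80, 35), (85, 36), (90, 37), (95, 38), (100, 39)],
-- 	25 : [(20, 24), (25, 27), (30, 25), (35, 25), (40, 26), (45, 27), (50, 29), (55, 31), (60, 32), (65, 33), (70, 34), (75, 35), (80, 36), (85, 37), (90, 38), (95, 39), (100, 40)],
-- 	26 : [(20, 26), (25, 28), (30, 26), (35, 27), (40, 28), (45, 29), (50, 30), (55, 32), (60, 33), (65, 34), (70, 35), (75, 36), (80, 37), (85, 38), (90, 39), (95, 40), (100, 41)],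
-- 	27 : [(20, 27), (25, 29), (30, 27), (35, 28), (40, 29), (45, 30), (50, 31), (55, 33), (60, 34), (65, 35), (70, 36), (75, 37), (80, 38), (85, 39), (90, 40), (95, 41), (100, 42)],
-- 	28 : [(20, 28), (25, 30), (30, 28), (35, 30), (40, 31), (45, 31), (50, 31), (55, 33), (60, 35), (65, 36), (70, 37), (75, 38), (80, 39), (85, 40), (90, 41), (95, 42), (100, 43)],
-- 	29 : [(20, 31), (25, 31), (30, 29), (35, 31), (40, 32), (45, 33), (50, 32), (55, 34), (60, 36), (65, 37), (70, 38), (75, 39), (80, 40), (85, 41), (90, 42), (95, 43), (100, 44)],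
-- 	30 : [(20, 32), (25, 32), (30, 30), (35, 32), (40, 34), (45, 36), (50, 34), (55, 35), (60, 37), (65, 38), (70, 39), (75, 40), (80, 41), (85, 42), (90, 43), (95, 44), (100, 45)],
-- 	31 : [(20, 32), (25, 33), (30, 31), (35, 34), (40, 35), (45, 36), (50, 36), (55, 36), (60, 38), (65, 39), (70, 40), (75, 41), (80, 42), (85, 43), (90, 44), (95, 45), (100, 46)],
-- 	32 : [(20, 32), (25, 33), (30, 33), (35, 35), (40, 37), (45, 38), (50, 37), (55, 38), (60, 39), (65, 40), (70, 41), (75, 42), (80, 43), (85, 44), (90, 45), (95, 46), (100, 47)],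
-- 	33 : [(20, 33), (25, 33), (30, 34), (35, 37), (40, 38), (45, 39), (50, 39), (55, 39), (60, 41), (65, 42), (70, 43), (75, 44), (80, 45), (85, 46), (90, 47), (95, 48), (100, 48)],
-- 	34 : [(20, 34), (25, 34), (30, 35), (35, 39), (40, 40), (45, 41), (50, 43), (55, 41), (60, 43), (65, 44), (70, 45), (75, 46), (80, 47), (85, 47), (90, 48), (95, 49), (100, 50)],
-- 	35 : [(20, 35), (25, 35), (30, 37), (35, 40), (40, 42), (45, 43), (50, 45), (55, 45), (60, 44), (65, 45), (70, 46), (75, 47), (80, 48), (85, 48), (90, 49), (95, 50), (100, 51)],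
-- 	36 : [(20, 36), (25, 36), (30, 40), (35, 42), (40, 43), (45, 45), (50, 46), (55, 47), (60, 47), (65, 48), (70, 49), (75, 50), (80, 49), (85, 49), (90, 50), (95, 51), (100, 53)],
-- 	37 : [(20, 37), (25, 37), (30, 42), (35, 43), (40, 45), (45, 45), (50, 47), (55, 49), (60, 49), (65, 50), (70, 51), (75, 52), (80, 53), (85, 53), (90, 55), (95, 55), (100, 54)],
-- 	38 : [(20, 38), (25, 38), (30, 43), (35, 45), (40, 47), (45, 48), (50, 49), (55, 50), (60, 51), (65, 52), (70, 53), (75, 54), (80, 55), (85, 56), (90, 57), (95, 57), (100, 57)],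
-- 	39 : [(20, 40), (25, 39), (30, 45), (35, 47), (40, 49), (45, 51), (50, 50), (55, 52), (60, 53), (65, 54), (70, 54), (75, 55), (80, 26), (85, 57), (90, 58), (95, 59), (100, 60)],
-- 	40 : [(20, 41), (25, 41), (30, 47), (35, 49), (40, 51), (45, 52), (50, 51), (55, 53), (60, 53), (65, 55), (70, 56), (75, 57), (80, 58), (85, 58), (90, 59), (95, 60), (100, 61)],
-- 	41 : [(20, 43), (25, 43), (30, 49), (35, 50), (40, 52), (45, 57), (50, 53), (55, 55), (60, 54), (65, 55), (70, 57), (75, 58), (80, 59), (85, 60), (90, 61), (95, 62), (100, 63)],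
-- }
--
-- def getAdvice(tempExt, humExt):
-- 	# Fonction qui cherche dans les textes predefinis le
-- 	# texte propre pour la temperature exterieure courante
-- 	# Donnees : tempExt : float, la temperature exterieure
-- 	# Resultat : advice : string, l'avis pour cettes conditions
--
-- 	advice = "La temperature exterieure est " + str(int(tempExt)) + " et l'humidite exterieure est " + str(int(humExt)) + " %, dans ces conditions"
-- 	humIdxValue = 0
-- 	tempExtEntier = int(tempExt)
--
-- 	for (hum, humIdx) in humidex[tempExtEntier]:
-- 		if hum < humExt:
-- 			humIdxValue = humExt
--
-- 	i = 0
-- 	while i < len(humidexToAdvice):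
-- 		(limiteSup, avis) = humidexToAdvice[i]
-- 		if limiteSup >= humIdxValue:
-- 			# We found the proper advice, we can stop searching for it
-- 			(_, adviceAfter) = humidexToAdvice[i]
-- 			advice = advice + adviceAfter
-- 			break
-- 		i = i + 1
-- 	return advice
-- ===== SOURCE B (Python) =====
-- import bisect
--
-- humidexToAdvice = [
-- 	(29, "Peu de gens sont incommodés."),
-- 	(34, "Une Sensation de malaise plus ou moins grande."),
-- 	(39, "Une Sensation de malaise assez grande. Prudence. Ralentir certaines activités en plein air."),
-- 	(45, "Une Sensation de malaise généralisée.  Danger. Eviter les efforts."),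
-- 	(53, "Il y a un danger extrême.  Il faut arrêter toutes les activités"),
-- 	(100, "Vous risquez un coup de chaleur imminent (danger de mort)."),
-- ]
--
-- _LIMITS = [lim for lim, _ in humidexToAdvice]
--
-- def getAdvice(tempExt, humExt):
-- 	# The original looks tempExt up in a 26-row humidity table, but every row of that
-- 	# table lists the humidities 20,25,...,100 (minimum 20) and its keys are exactly
-- 	# 16..41; so 'some listed humidity < humExt' is just 'humExt > 20' and the table
-- 	# itself is unnecessary.
-- 	t = int(tempExt)
-- 	if not (16 <= t <= 41):
-- 		raise KeyError(t)  # same error as the original's humidex[t] for unknown temperatures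
-- 	prefix = ("La temperature exterieure est " + str(t) +
-- 		" et l'humidite exterieure est " + str(int(humExt)) +
-- 		" %, dans ces conditions")
-- 	humIdxValue = humExt if humExt > 20 else 0
-- 	i = bisect.bisect_left(_LIMITS, humIdxValue)
-- 	if i < len(humidexToAdvice):
-- 		return prefix + humidexToAdvice[i][1]
-- 	return prefix
-- ===== Notes on version B (the rewrite author's own statement) =====
-- stated objective: alternative
-- what changed: B drops the 26-row humidity table entirely: since every row lists the humidities 20..100 (minimum 20) and the keys are exactly 16..41, the inner scan collapses to 'humExt > 20' plus a range check for the KeyError, and the sequential threshold scan becomes bisect.bisect_left over the advice upper limits.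
-- outside the precondition, e.g. on getAdvice(15, 50): A raises KeyError, B raises KeyError
import Mathlib
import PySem

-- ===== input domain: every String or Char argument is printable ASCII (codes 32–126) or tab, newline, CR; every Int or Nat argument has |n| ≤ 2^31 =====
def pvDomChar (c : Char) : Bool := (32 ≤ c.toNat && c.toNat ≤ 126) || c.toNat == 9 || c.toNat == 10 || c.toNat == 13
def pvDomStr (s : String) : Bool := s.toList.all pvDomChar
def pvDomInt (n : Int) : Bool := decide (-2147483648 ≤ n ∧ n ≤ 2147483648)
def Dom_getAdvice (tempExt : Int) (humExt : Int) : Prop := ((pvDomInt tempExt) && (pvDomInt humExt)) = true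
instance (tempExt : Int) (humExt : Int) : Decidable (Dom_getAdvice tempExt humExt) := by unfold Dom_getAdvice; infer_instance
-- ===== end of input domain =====

-- B replaces A's 26-row table lookup and two scans by the equivalent closed-form test
-- (every row's humidities are 20..100, keys are 16..41) plus bisect over the advice limits.
-- ===== PORT A =====
def humidexToAdviceL : List (Int × String) :=
[
  (29, "Peu de gens sont incommodés."),
  (34, "Une Sensation de malaise plus ou moins grande."),
  (39, "Une Sensation de malaise assez grande. Prudence. Ralentir certaines activités en plein air."),
  (45, "Une Sensation de malaise généralisée.  Danger. Eviter les efforts."),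
  (53, "Il y a un danger extrême.  Il faut arrêter toutes les activités"),
  (100, "Vous risquez un coup de chaleur imminent (danger de mort).")
]

def humidexD : PySem.Dict Int (List (Int × Int)) :=
  PySem.Dict.mk [
  (16, [(20, 20), (25, 21), (30, 21), (35, 20), (40, 20), (45, 21), (50, 22), (55, 23), (60, 24), (65, 24), (70, 25), (75, 26), (80, 26), (85, 27), (90, 28), (95, 28), (100, 29)]),
  (17, [(20, 20), (25, 21), (30, 21), (35, 20), (40, 20), (45, 21), (50, 22), (55, 23), (60, 24), (65, 25), (70, 26), (75, 27), (80, 28), (85, 29), (90, 30), (95, 31), (100, 31)]),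
  (18, [(20, 20), (25, 22), (30, 21), (35, 20), (40, 20), (45, 21), (50, 22), (55, 24), (60, 25), (65, 26), (70, 27), (75, 28), (80, 29), (85, 30), (90, 31), (95, 32), (100, 32)]),
  (19, [(20, 20), (25, 22), (30, 22), (35, 21), (40, 21), (45, 22), (50, 23), (55, 25), (60, 26), (65, 27), (70, 28), (75, 29), (80, 30), (85, 31), (90, 32), (95, 33), (100, 34)]),
  (20, [(20, 20), (25, 23), (30, 22), (35, 21), (40, 21), (45, 22), (50, 24), (55, 26), (60, 27), (65, 28), (70, 29), (75, 30), (80, 31), (85, 32), (90, 33), (95, 34), (100, 35)]),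
  (21, [(20, 21), (25, 24), (30, 22), (35, 21), (40, 21), (45, 22), (50, 25), (55, 27), (60, 28), (65, 29), (70, 30), (75, 31), (80, 32), (85, 33), (90, 34), (95, 35), (100, 36)]),
  (22, [(20, 22), (25, 25), (30, 23), (35, 22), (40, 22), (45, 23), (50, 25), (55, 28), (60, 29), (65, 30), (70, 31), (75, 32), (80, 33), (85, 34), (90, 35), (95, 36), (100, 37)]),
  (23, [(20, 23), (25, 25), (30, 24), (35, 23), (40, 24), (45, 25), (50, 26), (55, 29), (60, 30), (65, 31), (70, 32), (75, 33), (80, 34), (85, 35), (90, 36), (95, 37), (100, 38)]),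
  (24, [(20, 24), (25, 26), (30, 25), (35, 24), (40, 25), (45, 26), (50, 27), (55, 30), (60, 31), (65, 32), (70, 33), (75, 34), (80, 35), (85, 36), (90, 37), (95, 38), (100, 39)]),
  (25, [(20, 24), (25, 27), (30, 25), (35, 25), (40, 26), (45, 27), (50, 29), (55, 31), (60, 32), (65, 33), (70, 34), (75, 35), (80, 36), (85, 37), (90, 38), (95, 39), (100, 40)]),
  (26, [(20, 26), (25, 28), (30, 26), (35, 27), (40, 28), (45, 29), (50, 30), (55, 32), (60, 33), (65, 34), (70, 35), (75, 36), (80, 37), (85, 38), (90, 39), (95, 40), (100, 41)]),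
  (27, [(20, 27), (25, 29), (30, 27), (35, 28), (40, 29), (45, 30), (50, 31), (55, 33), (60, 34), (65, 35), (70, 36), (75, 37), (80, 38), (85, 39), (90, 40), (95, 41), (100, 42)]),
  (28, [(20, 28), (25, 30), (30, 28), (35, 30), (40, 31), (45, 31), (50, 31), (55, 33), (60, 35), (65, 36), (70, 37), (75, 38), (80, 39), (85, 40), (90, 41), (95, 42), (100, 43)]),
  (29, [(20, 31), (25, 31), (30, 29), (35, 31), (40, 32), (45, 33), (50, 32), (55, 34), (60, 36), (65, 37), (70, 38), (75, 39), (80, 40), (85, 41), (90, 42), (95, 43), (100, 44)]),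
  (30, [(20, 32), (25, 32), (30, 30), (35, 32), (40, 34), (45, 36), (50, 34), (55, 35), (60, 37), (65, 38), (70, 39), (75, 40), (80, 41), (85, 42), (90, 43), (95, 44), (100, 45)]),
  (31, [(20, 32), (25, 33), (30, 31), (35, 34), (40, 35), (45, 36), (50, 36), (55, 36), (60, 38), (65, 39), (70, 40), (75, 41), (80, 42), (85, 43), (90, 44), (95, 45), (100, 46)]),
  (32, [(20, 32), (25, 33), (30, 33), (35, 35), (40, 37), (45, 38), (50, 37), (55, 38), (60, 39), (65, 40), (70, 41), (75, 42), (80, 43), (85, 44), (90, 45), (95, 46), (100, 47)]),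
  (33, [(20, 33), (25, 33), (30, 34), (35, 37), (40, 38), (45, 39), (50, 39), (55, 39), (60, 41), (65, 42), (70, 43), (75, 44), (80, 45), (85, 46), (90, 47), (95, 48), (100, 48)]),
  (34, [(20, 34), (25, 34), (30, 35), (35, 39), (40, 40), (45, 41), (50, 43), (55, 41), (60, 43), (65, 44), (70, 45), (75, 46), (80, 47), (85, 47), (90, 48), (95, 49), (100, 50)]),
  (35, [(20, 35), (25, 35), (30, 37), (35, 40), (40, 42), (45, 43), (50, 45), (55, 45), (60, 44), (65, 45), (70, 46), (75, 47), (80, 48), (85, 48), (90, 49), (95, 50), (100, 51)]),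
  (36, [(20, 36), (25, 36), (30, 40), (35, 42), (40, 43), (45, 45), (50, 46), (55, 47), (60, 47), (65, 48), (70, 49), (75, 50), (80, 49), (85, 49), (90, 50), (95, 51), (100, 53)]),
  (37, [(20, 37), (25, 37), (30, 42), (35, 43), (40, 45), (45, 45), (50, 47), (55, 49), (60, 49), (65, 50), (70, 51), (75, 52), (80, 53), (85, 53), (90, 55), (95, 55), (100, 54)]),
  (38, [(20, 38), (25, 38), (30, 43), (35, 45), (40, 47), (45, 48), (50, 49), (55, 50), (60, 51), (65, 52), (70, 53), (75, 54), (80, 55), (85, 56), (90, 57), (95, 57), (100, 57)]),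
  (39, [(20, 40), (25, 39), (30, 45), (35, 47), (40, 49), (45, 51), (50, 50), (55, 52), (60, 53), (65, 54), (70, 54), (75, 55), (80, 26), (85, 57), (90, 58), (95, 59), (100, 60)]),
  (40, [(20, 41), (25, 41), (30, 47), (35, 49), (40, 51), (45, 52), (50, 51), (55, 53), (60, 53), (65, 55), (70, 56), (75, 57), (80, 58), (85, 58), (90, 59), (95, 60), (100, 61)]),
  (41, [(20, 43), (25, 43), (30, 49), (35, 50), (40, 52), (45, 57), (50, 53), (55, 55), (60, 54), (65, 55), (70, 57), (75, 58), (80, 59), (85, 60), (90, 61), (95, 62), (100, 63)])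
]

-- A's for-loop over humidex[tempExtEntier]: last matching assignment wins
def aHumLoop (humExt : Int) (acc : Int) : List (Int × Int) → Int
  | [] => acc
  | (hum, _) :: rest => aHumLoop humExt (if hum < humExt then humExt else acc) rest

-- A's while-loop with break over humidexToAdvice
def aAdviceLoop (advice : String) (humIdxValue : Int) : List (Int × String) → String
  | [] => advice
  | (limiteSup, avis) :: rest =>
      if limiteSup ≥ humIdxValue then advice ++ avis
      else aAdviceLoop advice humIdxValue rest

def getAdvice (tempExt : Int) (humExt : Int) : String :=
  let advice := "La temperature exterieure est " ++ PySem.Int.toStr tempExt ++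
    " et l'humidite exterieure est " ++ PySem.Int.toStr humExt ++ " %, dans ces conditions"
  match PySem.Dict.get? humidexD tempExt with
  | none => ""   -- KeyError in Python; excluded by Pre_
  | some row => aAdviceLoop advice (aHumLoop humExt 0 row) humidexToAdviceL

-- ===== PORT B =====
def limitsL : List Int := humidexToAdviceL.map Prod.fst

def getAdvice_alt (tempExt : Int) (humExt : Int) : String :=
  if ¬ (16 ≤ tempExt ∧ tempExt ≤ 41) then ""   -- Source B raises KeyError here; excluded by Pre_
  else
    let prefix_ := "La temperature exterieure est " ++ PySem.Int.toStr tempExt ++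
      " et l'humidite exterieure est " ++ PySem.Int.toStr humExt ++ " %, dans ces conditions"
    let humIdxValue : Int := if humExt > 20 then humExt else 0
    let i : Nat := PySem.List.bisectLeft limitsL humIdxValue
    if i < humidexToAdviceL.length then
      prefix_ ++ ((humidexToAdviceL.getD i (0, "")).2)
    else prefix_

-- ===== PRECONDITION & SPEC =====
-- Pre_ excludes temperatures outside the table's keys 16..41, where Python A raises KeyError.
def Pre_getAdvice (tempExt : Int) (humExt : Int) : Prop := 16 ≤ tempExt ∧ tempExt ≤ 41
instance (tempExt : Int) (humExt : Int) : Decidable (Pre_getAdvice tempExt humExt) := by unfold Pre_getAdvice; infer_instance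
def pvWitness_getAdvice : Int × Int := (25, 70)

def Spec_getAdvice (tempExt : Int) (humExt : Int) (out : String) : Prop := out = getAdvice_alt tempExt humExt
instance (tempExt : Int) (humExt : Int) (out : String) : Decidable (Spec_getAdvice tempExt humExt out) := by unfold Spec_getAdvice; infer_instance

-- ===== CLAIM (what is proved, stated in full; the proofs are below) =====
def Claim_equal_getAdvice : Prop := ∀ (tempExt : Int) (humExt : Int), Dom_getAdvice tempExt humExt → Pre_getAdvice tempExt humExt → Spec_getAdvice tempExt humExt (getAdvice tempExt humExt)

-- ===== LEMMAS AND PROOFS =====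

-- A's humidity loop computes 'humExt if any listed hum < humExt else acc'
theorem aHumLoop_eq_any (humExt : Int) (acc : Int) (l : List (Int × Int)) :
    aHumLoop humExt acc l = if l.any (fun p => p.1 < humExt) then humExt else acc := by
  induction l generalizing acc with
  | nil => simp [aHumLoop]
  | cons p rest ih =>
      obtain ⟨hum, hx⟩ := p
      simp only [aHumLoop, ih, List.any_cons]
      by_cases h : hum < humExt <;> by_cases h2 : rest.any (fun p => p.1 < humExt) <;>
        simp [h, h2]

-- a row headed by humidity 20 whose other humidities are ≥ 20: any(hum < x) ⟺ 20 < x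
theorem any_head20 (x k : Int) (l : List (Int × Int)) (h : ∀ p ∈ l, (20:Int) ≤ p.1) :
    (((20:Int), k) :: l).any (fun p => p.1 < x) = decide (20 < x) := by
  simp only [List.any_cons]
  by_cases hx : 20 < x
  · simp [hx]
  · simp only [hx, decide_false, Bool.false_or]
    simp only [not_lt] at hx ⊢
    simp only [List.any_eq_false, decide_eq_true_eq, not_lt]
    intro p hp; have := h p hp; omega

-- A's threshold scan equals B's bisect-based selection, for every value
theorem adviceLoop_eq_bisect (v : Int) (pfx : String) :
    aAdviceLoop pfx v humidexToAdviceL =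
      (let i : Nat := PySem.List.bisectLeft limitsL v;
       if i < humidexToAdviceL.length then pfx ++ ((humidexToAdviceL.getD i (0, "")).2) else pfx) := by
  by_cases h0 : v ≤ 29
  · simp [aAdviceLoop, humidexToAdviceL, limitsL, PySem.List.bisectLeft, PySem.List.bisectLeftLoop, show (29:Int) ≥ v by omega, show ¬ (45:Int) < v by omega, show ¬ (34:Int) < v by omega, show ¬ (29:Int) < v by omega]
  ·
    by_cases h1 : v ≤ 34
    · simp [aAdviceLoop, humidexToAdviceL, limitsL, PySem.List.bisectLeft, PySem.List.bisectLeftLoop, show ¬ (29:Int) ≥ v by omega, show (34:Int) ≥ v by omega, show ¬ (45:Int) < v by omega, show ¬ (34:Int) < v by omega, show (29:Int) < v by omega]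
    ·
      by_cases h2 : v ≤ 39
      · simp [aAdviceLoop, humidexToAdviceL, limitsL, PySem.List.bisectLeft, PySem.List.bisectLeftLoop, show ¬ (29:Int) ≥ v by omega, show ¬ (34:Int) ≥ v by omega, show (39:Int) ≥ v by omega, show ¬ (45:Int) < v by omega, show (34:Int) < v by omega, show ¬ (39:Int) < v by omega]
      ·
        by_cases h3 : v ≤ 45
        · simp [aAdviceLoop, humidexToAdviceL, limitsL, PySem.List.bisectLeft, PySem.List.bisectLeftLoop, show ¬ (29:Int) ≥ v by omega, show ¬ (34:Int) ≥ v by omega, show ¬ (39:Int) ≥ v by omega, show (45:Int) ≥ v by omega, show ¬ (45:Int) < v by omega, show (34:Int) < v by omega, show (39:Int) < v by omega]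
        ·
          by_cases h4 : v ≤ 53
          · simp [aAdviceLoop, humidexToAdviceL, limitsL, PySem.List.bisectLeft, PySem.List.bisectLeftLoop, show ¬ (29:Int) ≥ v by omega, show ¬ (34:Int) ≥ v by omega, show ¬ (39:Int) ≥ v by omega, show ¬ (45:Int) ≥ v by omega, show (53:Int) ≥ v by omega, show (45:Int) < v by omega, show ¬ (100:Int) < v by omega, show ¬ (53:Int) < v by omega]
          ·
            by_cases h5 : v ≤ 100
            · simp [aAdviceLoop, humidexToAdviceL, limitsL, PySem.List.bisectLeft, PySem.List.bisectLeftLoop, show ¬ (29:Int) ≥ v by omega, show ¬ (34:Int) ≥ v by omega, show ¬ (39:Int) ≥ v by omega, show ¬ (45:Int) ≥ v by omega, show ¬ (53:Int) ≥ v by omega, show (100:Int) ≥ v by omega, show (45:Int) < v by omega, show ¬ (100:Int) < v by omega, show (53:Int) < v by omega]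
            · simp [aAdviceLoop, humidexToAdviceL, limitsL, PySem.List.bisectLeft, PySem.List.bisectLeftLoop, show ¬ (29:Int) ≥ v by omega, show ¬ (34:Int) ≥ v by omega, show ¬ (39:Int) ≥ v by omega, show ¬ (45:Int) ≥ v by omega, show ¬ (53:Int) ≥ v by omega, show ¬ (100:Int) ≥ v by omega, show (45:Int) < v by omega, show (100:Int) < v by omega]

-- the lookup on keys 16..41 yields a row of shape (20, k) :: rest with all humidities ≥ 20
theorem humidexD_row (tempExt humExt : Int) (h : Pre_getAdvice tempExt humExt) :
    ∃ k rest, PySem.Dict.get? humidexD tempExt = some (((20:Int), k) :: rest) ∧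
      ∀ p ∈ rest, (20:Int) ≤ p.1 := by
  obtain ⟨h1, h2⟩ := h
  interval_cases tempExt <;> exact ⟨_, _, rfl, by decide⟩

-- ===== VERDICT (by name: the statement is the Claim_ definition above) =====
theorem getAdvice_spec : Claim_equal_getAdvice := by
  intro tempExt humExt _hdom hpre
  unfold Spec_getAdvice getAdvice getAdvice_alt
  obtain ⟨h1, h2⟩ := hpre
  obtain ⟨k, rest, hrow, hge⟩ := humidexD_row tempExt humExt ⟨h1, h2⟩
  have hcond : ¬ ¬ (16 ≤ tempExt ∧ tempExt ≤ 41) := fun hn => hn ⟨h1, h2⟩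
  simp only [hrow, aHumLoop_eq_any, any_head20 humExt k rest hge, adviceLoop_eq_bisect,
    if_neg hcond, gt_iff_lt, decide_eq_true_eq]
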